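-- pv_equiv track=rewrite | github.com/H-Wol/algorithmStudy | baekjoon/gold/14890_경사로.py | can_place_slope
-- ===== SOURCE A (Python) =====
-- def can_place_slope(line, L):
--     n = len(line)
--     used = [False] * n
--
--     for i in range(n - 1):
--         if line[i] == line[i + 1]:
--             continue
--         if abs(line[i] - line[i + 1]) > 1:
--             return False
--         if line[i] > line[i + 1]:
--             for j in range(i + 1, i + 1 + L):
--                 if j >= n or used[j] or line[i + 1] != line[j]:
--                     return False
--                 used[j] = True
--         else:
--             for j in range(i, i - L, -1):
--                 if j < 0 or used[j] or line[i] != line[j]: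
--                     return False
--                 used[j] = True
--     return True
-- ===== SOURCE B (Python) =====
-- def can_place_slope(line, L):
--     # One-pass counter scan: cnt tracks the usable (unramped) cells of the
--     # current flat run; an ascent needs cnt >= L, a descent resets cnt to 1 - L
--     # (the new run must supply L cells), checked at the next boundary or the end.
--     cnt = 1
--     for i in range(len(line) - 1):
--         d = line[i + 1] - line[i]
--         if d == 0:
--             cnt += 1
--         elif d == 1:
--             if cnt < L:
--                 return False
--             cnt = 1
--         elif d == -1:
--             if cnt < 0:
--                 return False
--             cnt = 1 - L
--         else:
--             return False
--     return cnt >= 0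
-- ===== Notes on version B (the rewrite author's own statement) =====
-- stated objective: alternative
-- what changed: Replaced A's used-array bookkeeping with nested ramp-marking inner loops by a single left-to-right pass that keeps one counter of usable cells in the current flat run (ascent needs cnt >= L, descent resets cnt to 1-L, end needs cnt >= 0).
import Mathlib
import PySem

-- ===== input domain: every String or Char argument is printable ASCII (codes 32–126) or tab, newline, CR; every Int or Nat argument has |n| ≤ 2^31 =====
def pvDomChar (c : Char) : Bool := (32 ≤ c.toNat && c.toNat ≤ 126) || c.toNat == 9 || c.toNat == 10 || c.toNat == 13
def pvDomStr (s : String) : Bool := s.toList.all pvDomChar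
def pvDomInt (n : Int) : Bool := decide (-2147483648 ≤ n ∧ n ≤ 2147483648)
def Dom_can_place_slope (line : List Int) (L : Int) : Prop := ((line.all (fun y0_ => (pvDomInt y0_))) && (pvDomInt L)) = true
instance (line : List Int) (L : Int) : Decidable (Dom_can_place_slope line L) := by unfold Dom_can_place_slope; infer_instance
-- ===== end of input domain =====

-- B replaces A's used-array with nested ramp-marking loops by a single-pass
-- counter scan over boundaries (objective: alternative decomposition, same cost class).


-- ===== PORT A =====
-- all list reads in both ports are guarded in range by the surrounding code,
-- so xs[j] is ported as pyGetD (exact there)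
def pvGetI (xs : List Int) (j : Int) : Int := PySem.List.pyGetD xs j 0
def pvGetB (xs : List Bool) (j : Int) : Bool := PySem.List.pyGetD xs j false

-- `for j in range(i+1, i+1+L)` : fuel L.toNat, j ascending
def aDown (line : List Int) (n tgt : Int) : Int → Nat → List Bool → Option (List Bool)
  | _, 0, used => some used
  | j, k+1, used =>
    if n ≤ j ∨ pvGetB used j = true ∨ tgt ≠ pvGetI line j then none
    else aDown line n tgt (j+1) k (used.set j.toNat true)

-- `for j in range(i, i-L, -1)` : fuel L.toNat, j descending
def aUp (line : List Int) (tgt : Int) : Int → Nat → List Bool → Option (List Bool)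
  | _, 0, used => some used
  | j, k+1, used =>
    if j < 0 ∨ pvGetB used j = true ∨ tgt ≠ pvGetI line j then none
    else aUp line tgt (j-1) k (used.set j.toNat true)

-- `for i in range(n-1)` with early returns and the mutated `used`
def canAux (line : List Int) (n L : Int) : Int → Nat → List Bool → Bool
  | _, 0, _ => true
  | i, k+1, used =>
    if pvGetI line i = pvGetI line (i+1) then canAux line n L (i+1) k used
    else if 1 < |pvGetI line i - pvGetI line (i+1)| then false
    else if pvGetI line (i+1) < pvGetI line i then
      match aDown line n (pvGetI line (i+1)) (i+1) L.toNat used with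
      | none => false
      | some used' => canAux line n L (i+1) k used'
    else
      match aUp line (pvGetI line i) i L.toNat used with
      | none => false
      | some used' => canAux line n L (i+1) k used'

def can_place_slope (line : List Int) (L : Int) : Bool :=
  canAux line (line.length : Int) L 0 ((line.length : Int) - 1).toNat
    (List.replicate line.length false)

-- ===== PORT B =====
-- one pass over boundaries, cnt = usable cells of the current flat run
def bAux (line : List Int) (L : Int) : Int → Nat → Int → Bool
  | _, 0, cnt => decide (0 ≤ cnt)
  | i, k+1, cnt =>
    if pvGetI line (i+1) - pvGetI line i = 0 then bAux line L (i+1) k (cnt + 1)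
    else if pvGetI line (i+1) - pvGetI line i = 1 then
      if cnt < L then false else bAux line L (i+1) k 1
    else if pvGetI line (i+1) - pvGetI line i = -1 then
      if cnt < 0 then false else bAux line L (i+1) k (1 - L)
    else false

def can_place_slope_alt (line : List Int) (L : Int) : Bool :=
  bAux line L 0 ((line.length : Int) - 1).toNat 1

-- ===== PRECONDITION & SPEC =====
def Spec_can_place_slope (line : List Int) (L : Int) (out : Bool) : Prop := out = can_place_slope_alt line L
instance (line : List Int) (L : Int) (out : Bool) : Decidable (Spec_can_place_slope line L out) := by unfold Spec_can_place_slope; infer_instance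

-- ===== CLAIM (what is proved, stated in full; the proofs are below) =====
def Claim_equal_can_place_slope : Prop := ∀ (line : List Int) (L : Int), Dom_can_place_slope line L → Spec_can_place_slope line L (can_place_slope line L)

-- ===== LEMMAS AND PROOFS =====

lemma getB_nonneg (xs : List Bool) (x : Int) (hx : 0 ≤ x) :
    pvGetB xs x = (xs[x.toNat]?).getD false := by
  rw [pvGetB, PySem.List.pyGetD_of_nonneg xs false hx, List.getD_eq_getElem?_getD]

lemma getB_replicate (n : Nat) (x : Int) (hx : 0 ≤ x) :
    pvGetB (List.replicate n false) x = false := by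
  rw [getB_nonneg _ _ hx, List.getElem?_replicate]
  by_cases h : x.toNat < n <;> simp [h]

lemma getB_set_self (xs : List Bool) (j : Int) (h0 : 0 ≤ j) (hlt : j < (xs.length : Int)) :
    pvGetB (xs.set j.toNat true) j = true := by
  rw [getB_nonneg _ _ h0, List.getElem?_set]
  have : j.toNat < xs.length := by omega
  simp [this]

lemma getB_set_ne (xs : List Bool) (j x : Int) (h0 : 0 ≤ j) (hx : 0 ≤ x) (hne : x ≠ j) :
    pvGetB (xs.set j.toNat true) x = pvGetB xs x := by
  rw [getB_nonneg _ _ hx, getB_nonneg _ _ hx, List.getElem?_set]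
  have : j.toNat ≠ x.toNat := by omega
  simp [this]

lemma getB_false_of_iff {b : Bool} {P : Prop} (h : b = true ↔ P) (hnp : ¬ P) : b = false := by
  cases hB : b
  · rfl
  · exact absurd (h.mp hB) hnp

lemma aDown_some (line : List Int) (tgt : Int) :
    ∀ (k : Nat) (j : Int) (used : List Bool),
    0 ≤ j →
    used.length = line.length →
    (∀ x : Int, j ≤ x → pvGetB used x = false) →
    (∀ p : Nat, (p : Int) < (k : Int) → j + p < (line.length : Int) ∧ pvGetI line (j + p) = tgt) →
    ∃ used', aDown line (line.length : Int) tgt j k used = some used' ∧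
      used'.length = line.length ∧
      (∀ x : Int, 0 ≤ x →
        (pvGetB used' x = true ↔ (pvGetB used x = true ∨ (j ≤ x ∧ x < j + (k : Int))))) := by
  intro k
  induction k with
  | zero =>
    intro j used _ hlen hu _
    refine ⟨used, rfl, hlen, ?_⟩
    intro x _
    have hno : ¬(j ≤ x ∧ x < j + ((0:Nat) : Int)) := by push_cast; omega
    tauto
  | succ k ih =>
    intro j used hj hlen hu hall
    have h0 := hall 0 (by push_cast; omega)
    simp only [Int.natCast_zero, add_zero] at h0
    have hcond : ¬((line.length : Int) ≤ j ∨ pvGetB used j = true ∨ tgt ≠ pvGetI line j) := by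
      push_neg
      exact ⟨by omega, by simp [hu j le_rfl], h0.2.symm⟩
    rw [aDown, if_neg hcond]
    have hjlen : j < (line.length : Int) := h0.1
    obtain ⟨used', heq, hlen', hchar⟩ := ih (j+1) (used.set j.toNat true) (by omega)
      (by rw [List.length_set]; exact hlen)
      (by intro x hx
          rw [getB_set_ne _ _ _ hj (by omega) (by omega)]
          exact hu x (by omega))
      (by intro p hp
          have hcast : j + 1 + (p : Int) = j + ((p + 1 : Nat) : Int) := by push_cast; ring
          rw [hcast]
          exact hall (p+1) (by push_cast at hp ⊢; omega))
    refine ⟨used', heq, hlen', ?_⟩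
    intro x hx
    rw [hchar x hx]
    by_cases hxj : x = j
    · subst hxj
      rw [getB_set_self _ _ hj (by omega)]
      constructor
      · intro _
        right
        constructor
        · omega
        · push_cast; omega
      · intro _
        left
        rfl
    · rw [getB_set_ne _ _ _ hj hx hxj]
      constructor
      · rintro (h | h)
        · exact Or.inl h
        · right
          push_cast at h ⊢
          omega
      · rintro (h | h)
        · exact Or.inl h
        · right
          push_cast at h ⊢
          omega

lemma aDown_none (line : List Int) (tgt : Int) :
    ∀ (k : Nat) (j : Int) (used : List Bool),
    0 ≤ j →
    used.length = line.length →
    (∀ x : Int, j ≤ x → pvGetB used x = false) →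
    (∃ p : Nat, (p : Int) < (k : Int) ∧ ((line.length : Int) ≤ j + p ∨ pvGetI line (j + p) ≠ tgt)) →
    aDown line (line.length : Int) tgt j k used = none := by
  intro k
  induction k with
  | zero =>
    rintro j used _ _ _ ⟨p, hp, _⟩
    exfalso
    push_cast at hp
    omega
  | succ k ih =>
    rintro j used hj hlen hu ⟨p, hp, hfail⟩
    by_cases hhead : (line.length : Int) ≤ j ∨ pvGetB used j = true ∨ tgt ≠ pvGetI line j
    · rw [aDown, if_pos hhead]
    · rw [aDown, if_neg hhead]
      push_neg at hhead
      have hp0 : p ≠ 0 := by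
        rintro rfl
        simp only [Int.natCast_zero, add_zero] at hfail
        rcases hfail with h | h
        · omega
        · exact h hhead.2.2.symm
      apply ih (j+1) _ (by omega) (by rw [List.length_set]; exact hlen)
        (by intro x hx
            rw [getB_set_ne _ _ _ hj (by omega) (by omega)]
            exact hu x (by omega))
      refine ⟨p - 1, by push_cast at hp ⊢; omega, ?_⟩
      rw [show j + 1 + ((p-1 : Nat) : Int) = j + p by push_cast; omega]
      exact hfail

lemma aUp_some (line : List Int) (s e i0 tgt : Int)
    (hs : 0 ≤ s) (hse : s ≤ e) (hei : e ≤ i0 + 1) (hi0 : i0 < (line.length : Int))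
    (hrun : ∀ x : Int, s ≤ x → x ≤ i0 → pvGetI line x = tgt) :
    ∀ (k : Nat) (j : Int) (used : List Bool),
    j ≤ i0 →
    used.length = line.length →
    (∀ x : Int, s ≤ x → (pvGetB used x = true ↔ ((j < x ∧ x ≤ i0) ∨ x < e))) →
    e ≤ j - k + 1 →
    ∃ used', aUp line tgt j k used = some used' ∧
      used'.length = line.length ∧
      (∀ x : Int, i0 + 1 ≤ x → pvGetB used' x = pvGetB used x) := by
  intro k
  induction k with
  | zero =>
    intro j used _ hlen _ _
    exact ⟨used, rfl, hlen, fun _ _ => rfl⟩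
  | succ k ih =>
    intro j used hji hlen hu hcond
    have hje : e + (k : Int) ≤ j := by push_cast at hcond; omega
    have hsj : s ≤ j := by omega
    have hufj : pvGetB used j = false :=
      getB_false_of_iff (hu j hsj) (by rintro (⟨h1, h2⟩ | h) <;> omega)
    have hcondh : ¬(j < 0 ∨ pvGetB used j = true ∨ tgt ≠ pvGetI line j) := by
      push_neg
      exact ⟨by omega, by simp [hufj], (hrun j hsj hji).symm⟩
    rw [aUp, if_neg hcondh]
    obtain ⟨used', heq, hlen', hsame⟩ := ih (j-1) (used.set j.toNat true)
      (by omega) (by rw [List.length_set]; exact hlen)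
      (by intro x hx
          by_cases hxj : x = j
          · subst hxj
            rw [getB_set_self _ _ (by omega) (by omega)]
            constructor
            · intro _
              left
              omega
            · intro _
              rfl
          · rw [getB_set_ne _ _ _ (by omega) (by omega) hxj]
            rw [hu x hx]
            constructor
            · rintro (h | h)
              · left; omega
              · right; exact h
            · rintro (h | h)
              · left; omega
              · right; exact h)
      (by push_cast at hcond ⊢; omega)
    refine ⟨used', heq, hlen', ?_⟩
    intro x hx
    rw [hsame x hx, getB_set_ne _ _ _ (by omega) (by omega) (by omega)]

lemma aUp_none (line : List Int) (s e i0 tgt : Int)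
    (hs : 0 ≤ s) (hse : s ≤ e) (hei : e ≤ i0 + 1) (hi0 : i0 < (line.length : Int))
    (hrun : ∀ x : Int, s ≤ x → x ≤ i0 → pvGetI line x = tgt)
    (hbound : s = 0 ∨ pvGetI line (s-1) ≠ tgt) :
    ∀ (k : Nat) (j : Int) (used : List Bool),
    j ≤ i0 →
    used.length = line.length →
    (∀ x : Int, s ≤ x → (pvGetB used x = true ↔ ((j < x ∧ x ≤ i0) ∨ x < e))) →
    e - 1 ≤ j →
    j - (e - 1) < (k : Int) →
    aUp line tgt j k used = none := by
  intro k
  induction k with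
  | zero =>
    intro j used _ _ _ hj hcnt
    exfalso
    push_cast at hcnt
    omega
  | succ k ih =>
    intro j used hji hlen hu hj hcnt
    by_cases hje : e ≤ j
    · -- head passes, recurse
      have hsj : s ≤ j := by omega
      have hufj : pvGetB used j = false :=
        getB_false_of_iff (hu j hsj) (by rintro (⟨h1, h2⟩ | h) <;> omega)
      have hcondh : ¬(j < 0 ∨ pvGetB used j = true ∨ tgt ≠ pvGetI line j) := by
        push_neg
        exact ⟨by omega, by simp [hufj], (hrun j hsj hji).symm⟩
      rw [aUp, if_neg hcondh]
      apply ih (j-1) _ (by omega) (by rw [List.length_set]; exact hlen)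
        (by intro x hx
            by_cases hxj : x = j
            · subst hxj
              rw [getB_set_self _ _ (by omega) (by omega)]
              constructor
              · intro _
                left
                omega
              · intro _
                rfl
            · rw [getB_set_ne _ _ _ (by omega) (by omega) hxj]
              rw [hu x hx]
              constructor
              · rintro (h | h)
                · left; omega
                · right; exact h
              · rintro (h | h)
                · left; omega
                · right; exact h)
        (by omega) (by push_cast at hcnt ⊢; omega)
    · -- head fails: j = e - 1
      have : j < 0 ∨ pvGetB used j = true ∨ tgt ≠ pvGetI line j := by
        by_cases hsj : s ≤ j
        · right; left
          rw [hu j hsj]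
          right
          omega
        · have hjs : j = s - 1 := by omega
          rcases hbound with h0 | hne
          · left; omega
          · right; right
            rw [hjs]
            exact fun h => hne h.symm
      rw [aUp, if_pos this]

lemma bAux_short (line : List Int) (L e : Int) (h1L : 1 ≤ L)
    (hen : e ≤ (line.length : Int) - 1)
    (hb : e = (line.length : Int) - 1 ∨ pvGetI line (e+1) ≠ pvGetI line e) :
    ∀ (k : Nat) (i cnt : Int),
    i = (line.length : Int) - 1 - (k : Int) →
    i ≤ e →
    (∀ x : Int, i ≤ x → x ≤ e → pvGetI line x = pvGetI line e) →
    cnt + (e - i) < 0 →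
    bAux line L i k cnt = false := by
  intro k
  induction k with
  | zero =>
    intro i cnt hik hie _ hcnt
    have : i = e := by push_cast at hik; omega
    subst this
    simp only [bAux, decide_eq_false_iff_not]
    omega
  | succ k ih =>
    intro i cnt hik hie hrun hcnt
    have hin : i < (line.length : Int) - 1 := by push_cast at hik; omega
    by_cases hieq : i < e
    · have h1 : pvGetI line (i+1) - pvGetI line i = 0 := by
        rw [hrun (i+1) (by omega) (by omega), hrun i le_rfl (by omega)]
        ring
      rw [bAux, if_pos h1]
      exact ih (i+1) (cnt+1) (by push_cast; push_cast at hik; omega) (by omega)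
        (fun x hx1 hx2 => hrun x (by omega) hx2) (by omega)
    · have hieqe : i = e := by omega
      subst hieqe
      rcases hb with h0 | hne
      · exfalso; omega
      · have hcnt0 : cnt < 0 := by omega
        have hd : pvGetI line (i+1) - pvGetI line i ≠ 0 := by
          intro h; exact hne (by omega)
        rw [bAux, if_neg hd]
        by_cases h1 : pvGetI line (i+1) - pvGetI line i = 1
        · rw [if_pos h1, if_pos (by omega)]
        · rw [if_neg h1]
          by_cases h2 : pvGetI line (i+1) - pvGetI line i = -1
          · rw [if_pos h2, if_pos (by omega)]
          · rw [if_neg h2]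

lemma main_inv (line : List Int) (L : Int) :
    ∀ (k : Nat) (i s : Int) (f : Bool) (used : List Bool) (cnt : Int),
    i = (line.length : Int) - 1 - (k : Int) →
    0 ≤ s → s ≤ i →
    (∀ x : Int, s ≤ x → x ≤ i → pvGetI line x = pvGetI line s) →
    (s = 0 ∨ pvGetI line (s-1) ≠ pvGetI line s) →
    used.length = line.length →
    (∀ x : Int, s ≤ x → (pvGetB used x = true ↔ (f = true ∧ x < s + max L 0))) →
    (f = true → 1 ≤ s ∧ pvGetI line (s-1) = pvGetI line s + 1 ∧
      (∀ x : Int, s ≤ x → x < s + max L 0 → pvGetI line x = pvGetI line s) ∧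
      s + max L 0 ≤ (line.length : Int)) →
    cnt = i - s + 1 - (if f = true then L else 0) →
    canAux line (line.length : Int) L i k used = bAux line L i k cnt := by
  intro k
  induction k with
  | zero =>
    intro i s f used cnt hik hs hsi _ _ _ _ hf hcnt
    have hi : i = (line.length : Int) - 1 := by push_cast at hik; omega
    have h0c : 0 ≤ cnt := by
      cases f with
      | false =>
        simp only [Bool.false_eq_true, if_false] at hcnt
        omega
      | true =>
        obtain ⟨_, _, _, h4⟩ := hf rfl
        simp only [if_pos] at hcnt
        omega
    simp [canAux, bAux, h0c]
  | succ k ih =>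
    intro i s f used cnt hik hs hsi hrun hbound hlen hu hf hcnt
    have hin : i ≤ (line.length : Int) - 2 := by push_cast at hik; omega
    have hik1 : i + 1 = (line.length : Int) - 1 - (k : Int) := by push_cast; push_cast at hik; omega
    have hLmax : (L.toNat : Int) = max L 0 := by omega
    by_cases hab : pvGetI line i = pvGetI line (i+1)
    · -- flat step
      rw [canAux, if_pos hab, bAux, if_pos (by omega)]
      exact ih (i+1) s f used (cnt+1) hik1 hs (by omega)
        (by intro x hx1 hx2
            by_cases hxe : x = i + 1
            · subst hxe; rw [← hab]; exact hrun i (by omega) le_rfl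
            · exact hrun x hx1 (by omega))
        hbound hlen hu hf
        (by cases f with
            | false => simp only [Bool.false_eq_true, if_false] at hcnt ⊢; omega
            | true => simp only [if_pos] at hcnt ⊢; omega)
    · rw [canAux, if_neg hab]
      by_cases hbig : 1 < |pvGetI line i - pvGetI line (i+1)|
      · rw [if_pos hbig]
        rcases lt_abs.mp hbig with h | h
        · rw [bAux, if_neg (by omega), if_neg (by omega), if_neg (by omega)]
        · rw [bAux, if_neg (by omega), if_neg (by omega), if_neg (by omega)]
      · rw [if_neg hbig]
        have habs := abs_le.mp (not_lt.mp hbig)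
        by_cases hdown : pvGetI line (i+1) < pvGetI line i
        · -- descending boundary: line[i+1] = line[i] - 1
          have hd : pvGetI line (i+1) - pvGetI line i = -1 := by omega
          rw [if_pos hdown]
          -- marks never reach past i here
          have hmarks : f = true → s + max L 0 ≤ i + 1 := by
            intro hft
            by_contra hcon
            have := (hf hft).2.1
            have h3 := (hf hft).2.2.1 (i+1) (by omega) (by omega)
            have := hrun i hsi le_rfl
            omega
          have hcge : 0 ≤ cnt := by
            cases f with
            | false => simp at hcnt; omega
            | true => have := hmarks rfl; simp at hcnt; omega
          rw [bAux, if_neg (by omega), if_neg (by omega), if_pos hd, if_neg (by omega)]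
          have hufalse : ∀ x : Int, i + 1 ≤ x → pvGetB used x = false := by
            intro x hx
            have := hu x (by omega)
            cases hux : pvGetB used x
            · rfl
            · exfalso
              have := this.mp hux
              have := hmarks this.1
              omega
          by_cases hC : ∀ p : Nat, (p : Int) < (L.toNat : Int) →
              (i + 1) + p < (line.length : Int) ∧ pvGetI line ((i+1) + p) = pvGetI line (i+1)
          · -- ramp fits
            obtain ⟨used', heq, hlen', hchar⟩ := aDown_some line (pvGetI line (i+1)) L.toNat (i+1)
              used (by omega) hlen (fun x hx => hufalse x hx) hC
            rw [heq]
            apply ih (i+1) (i+1) true used' (1 - L) hik1 (by omega) le_rfl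
              (by intro x hx1 hx2
                  have hxe : x = i + 1 := by omega
                  rw [hxe])
              (by right
                  rw [show i + 1 - 1 = i by ring]
                  intro h; exact hab h)
              hlen'
              (by intro x hx
                  rw [hchar x (by omega)]
                  rw [hufalse x hx]
                  simp
                  omega)
              (by intro _
                  refine ⟨by omega, by rw [show i + 1 - 1 = i by ring]; omega, ?_, ?_⟩
                  · intro x hx1 hx2
                    have := hC (x - (i+1)).toNat (by omega)
                    rw [show (i+1) + ((x - (i+1)).toNat : Int) = x by omega] at this
                    exact this.2
                  · by_cases hL0 : max L 0 = 0
                    · omega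
                    · have := hC (max L 0 - 1).toNat (by omega)
                      omega)
              (by rw [if_pos rfl]; ring)
          · -- ramp does not fit: A fails now, B fails inside the next run
            push_neg at hC
            obtain ⟨p, hp, hpfail⟩ := hC
            have hPfail : ¬((i + 1) + (p : Int) < (line.length : Int) ∧
                pvGetI line ((i+1) + (p : Int)) = pvGetI line (i+1)) :=
              fun hAB => hpfail hAB.1 hAB.2
            have hPex : ∃ q : Nat, ¬((i + 1) + (q : Int) < (line.length : Int) ∧
                pvGetI line ((i+1) + (q : Int)) = pvGetI line (i+1)) := ⟨p, hPfail⟩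
            rw [aDown_none line (pvGetI line (i+1)) L.toNat (i+1) used (by omega) hlen
                (fun x hx => hufalse x hx)
                (by refine ⟨p, hp, ?_⟩
                    by_cases hlt : (i + 1) + (p : Int) < (line.length : Int)
                    · right; exact hpfail hlt
                    · left; omega)]
            -- B: enters the short run with cnt = 1 - L and dies there
            have hfind := Nat.find_spec hPex
            set p0 := Nat.find hPex with hp0def
            have hmin : ∀ q : Nat, q < p0 → (i + 1) + (q : Int) < (line.length : Int) ∧
                pvGetI line ((i+1) + (q : Int)) = pvGetI line (i+1) := by
              intro q hq
              have := Nat.find_min hPex hq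
              exact not_not.mp this
            have hp0le : p0 ≤ p := Nat.find_min' hPex hPfail
            have hp0pos : 1 ≤ p0 := by
              rcases Nat.eq_zero_or_pos p0 with h0 | h1
              · exfalso
                apply hfind
                rw [h0]
                refine ⟨by omega, by norm_num⟩
              · exact h1
            have hLpos : 1 ≤ L := by omega
            have he1 : (i + 1) + ((p0 : Int) - 1) < (line.length : Int) := by
              have := hmin (p0 - 1) (by omega)
              have h := this.1
              push_cast at h
              omega
            apply Eq.symm
            apply bAux_short line L (i + (p0 : Int)) hLpos (by omega)
              (by rcases not_and_or.mp hfind with h | h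
                  · left; omega
                  · right
                    rw [show i + (p0 : Int) + 1 = (i+1) + (p0 : Int) by ring]
                    have hge : pvGetI line (i + (p0 : Int)) = pvGetI line (i+1) := by
                      have := hmin (p0 - 1) (by omega)
                      have h2 := this.2
                      rw [show (i+1) + (((p0 - 1 : Nat)) : Int) = i + (p0 : Int) by push_cast; omega] at h2
                      exact h2
                    rw [hge]
                    exact h)
              k (i+1) (1 - L) hik1 (by omega)
              (by intro x hx1 hx2
                  have hx := hmin (x - (i+1)).toNat (by omega)
                  rw [show (i+1) + (((x - (i+1)).toNat) : Int) = x by omega] at hx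
                  have he := hmin (p0 - 1) (by omega)
                  rw [show (i+1) + (((p0 - 1 : Nat)) : Int) = i + (p0 : Int) by push_cast; omega] at he
                  rw [hx.2, he.2])
              (by omega)
        · -- ascending boundary: line[i+1] = line[i] + 1
          have hd1 : pvGetI line (i+1) - pvGetI line i = 1 := by omega
          rw [if_neg hdown]
          have hgis : pvGetI line i = pvGetI line s := hrun i hsi le_rfl
          have hmarks : f = true → s + max L 0 ≤ i + 1 := by
            intro hft
            by_contra hcon
            have h3 := (hf hft).2.2.1 (i+1) (by omega) (by omega)
            omega
          set e : Int := s + (if f = true then max L 0 else 0) with he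
          have hse : s ≤ e := by rw [he]; split <;> omega
          have hei : e ≤ i + 1 := by
            rw [he]
            cases f with
            | false => simp; omega
            | true => have := hmarks rfl; simp; omega
          have huform : ∀ x : Int, s ≤ x →
              (pvGetB used x = true ↔ ((i < x ∧ x ≤ i) ∨ x < e)) := by
            intro x hx
            rw [hu x hx, he]
            cases f with
            | false => simp; omega
            | true => simp
          have hrun' : ∀ x : Int, s ≤ x → x ≤ i → pvGetI line x = pvGetI line i := by
            intro x hx1 hx2
            rw [hrun x hx1 hx2, hgis]
          have hbound' : s = 0 ∨ pvGetI line (s-1) ≠ pvGetI line i := by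
            rcases hbound with h | h
            · exact Or.inl h
            · right; rw [hgis]; exact h
          rw [bAux, if_neg (by omega), if_pos hd1]
          by_cases hC2 : e ≤ i - (L.toNat : Int) + 1
          · -- up-ramp fits
            obtain ⟨used', heq, hlen', hsame⟩ := aUp_some line s e i (pvGetI line i)
              hs hse hei (by omega) hrun' L.toNat i used le_rfl hlen huform hC2
            rw [heq]
            have hcge : ¬(cnt < L) := by
              rw [he] at hC2
              cases f with
              | false => simp at hcnt hC2; omega
              | true => simp at hcnt hC2; omega
            rw [if_neg hcge]
            apply ih (i+1) (i+1) false used' 1 hik1 (by omega) le_rfl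
              (by intro x hx1 hx2
                  have : x = i + 1 := by omega
                  rw [this])
              (by right
                  rw [show i + 1 - 1 = i by ring]
                  intro h; exact hab h)
              hlen'
              (by intro x hx
                  rw [hsame x hx]
                  rw [hu x (by omega)]
                  constructor
                  · rintro ⟨hft, hxlt⟩
                    exfalso
                    have := hmarks hft
                    omega
                  · rintro ⟨hff, _⟩
                    exact absurd hff (by simp))
              (by intro h; exact absurd h (by simp))
              (by rw [if_neg (by simp)]; ring)
          · -- up-ramp blocked: both fail
            rw [aUp_none line s e i (pvGetI line i) hs hse hei (by omega) hrun' hbound'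
                L.toNat i used le_rfl hlen huform (by omega) (by omega)]
            have hclt : cnt < L := by
              rw [he] at hC2
              cases f with
              | false => simp at hcnt hC2; omega
              | true => simp at hcnt hC2; omega
            rw [if_pos hclt]

-- ===== VERDICT (by name: the statement is the Claim_ definition above) =====
theorem can_place_slope_spec : Claim_equal_can_place_slope := by
  intro line L _
  unfold Spec_can_place_slope can_place_slope can_place_slope_alt
  rcases Nat.eq_zero_or_pos line.length with h0 | hpos
  · rw [h0]
    rfl
  · have hk : (((line.length : Int) - 1).toNat : Int) = (line.length : Int) - 1 := by omega
    apply main_inv line L (((line.length : Int) - 1).toNat) 0 0 false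
      (List.replicate line.length false) 1
      (by omega) le_rfl (by omega)
      (by intro x hx1 hx2
          have : x = 0 := by omega
          rw [this])
      (Or.inl rfl)
      (by simp)
      (by intro x hx
          rw [getB_replicate _ _ hx]
          simp)
      (by intro h; exact absurd h (by simp))
      (by simp)
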